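-- pv_equiv track=rewrite | github.com/Komodo2013/python_projects | PyCalendar/crypto/crypto_utils.py | create_packets
-- ===== SOURCE A (Python) =====
-- import math
--
-- def create_packets(bytes_in):
--     """
--     Takes in a blob of bytes and divides them into a 3d list of 2d 8x8 matrices of bytes, fills by column
--     :param bytes_in: a byte_array of any size
--     :return: a 3d list of 2d 8x8 matrices of bytes where each matrix is defined as a packet
--     """
--
--     # Figure out how many packets we'll need
--     num_packs = math.ceil(len(bytes_in) / 64)
--
--     # iterator for the byte_array
--     num_parsed = 0
--     pack = [0, 0, 0, 0, 0, 0, 0, 0]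
--     data_packs = []
--     for p in range(num_packs):
--         data_packs.append(0)
--         tailing_lines = 0
--         remainder = []
--         for row in range(8):
--             to_append = []
--             if num_parsed + 8 <= len(bytes_in):
--                 part = bytes_in[num_parsed:num_parsed + 8]
--                 for n in part:
--                     to_append.append(n)
--             else:
--                 if tailing_lines == 0:
--                     tailing_lines += 1
--                     part = bytes_in[num_parsed:]
--                     for n in part:
--                         remainder.append(n)
--                     remainder.append(128)
--                     while len(remainder) < (8 - row) * 8 - 1:
--                         remainder.append(0)
--                     remainder.append(7)
--
--                     to_append = remainder[0:8]
--                 else: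
--                     to_append = remainder[tailing_lines * 8: tailing_lines * 8 + 8]
--                     tailing_lines += 1
--             pack[row] = to_append[:]
--             num_parsed += 8
--         data_packs[p] = pack[:]
--
--     return data_packs
-- ===== SOURCE B (Python) =====
-- def create_packets(bytes_in):
--     """
--     Takes in a blob of bytes and divides them into a 3d list of 2d 8x8 matrices of bytes, fills by column
--     :param bytes_in: a byte_array of any size
--     :return: a 3d list of 2d 8x8 matrices of bytes where each matrix is defined as a packet
--     """
--     n = len(bytes_in)
--     num_packs = -(-n // 64)
--     size = num_packs * 64
--     # Build one flat padded buffer, then reshape it into 8x8 packets.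
--     flat = list(bytes_in)
--     if n % 64 != 0:
--         flat.append(128)
--     flat.extend([0] * (size - 1 - len(flat)))
--     if len(flat) < size:
--         flat.append(7)
--     return [[flat[p * 64 + r * 8: p * 64 + r * 8 + 8] for r in range(8)]
--             for p in range(num_packs)]
-- ===== Notes on version B (the rewrite author's own statement) =====
-- stated objective: simpler
-- what changed: Replaces A's stateful per-row machinery (num_parsed cursor, tailing_lines counter, incrementally built remainder buffer distributed over rows) by building one flat padded buffer (append 128, zero-fill to size-1, conditionally append 7) and reshaping it into 8x8 packets with slice comprehensions.
import Mathlib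
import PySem

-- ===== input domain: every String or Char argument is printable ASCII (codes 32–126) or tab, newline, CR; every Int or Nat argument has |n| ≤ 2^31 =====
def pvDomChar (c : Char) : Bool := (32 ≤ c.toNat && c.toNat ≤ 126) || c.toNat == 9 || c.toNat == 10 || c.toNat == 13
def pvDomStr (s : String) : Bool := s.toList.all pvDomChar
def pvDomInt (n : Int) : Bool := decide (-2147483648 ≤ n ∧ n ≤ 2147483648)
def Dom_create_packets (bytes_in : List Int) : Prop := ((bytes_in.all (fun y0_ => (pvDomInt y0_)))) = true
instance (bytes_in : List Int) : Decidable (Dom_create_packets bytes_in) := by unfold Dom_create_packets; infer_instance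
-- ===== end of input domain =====

-- B replaces A's stateful remainder/tailing_lines row machinery by one flat padded
-- buffer that is then reshaped into 8x8 packets (objective: simpler).

-- ===== PORT A =====
-- the `while len(remainder) < target: remainder.append(0)` loop of A
def cpPadTo (target : Nat) (r : List Int) : List Int :=
  if r.length < target then cpPadTo target (r ++ [0]) else r
termination_by target - r.length
decreasing_by simp [List.length_append]; omega

-- one iteration of A's `for row in range(8)` loop; state = (num_parsed, tailing_lines, remainder, pack)
def cpInner (bs : List Int) (st : Nat × Nat × List Int × List (List Int)) (row : Nat) :
    Nat × Nat × List Int × List (List Int) :=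
  match st with
  | (num_parsed, tailing, remainder, pack) =>
    if num_parsed + 8 ≤ bs.length then
      -- slice bytes_in[num_parsed:num_parsed+8] (non-negative in-range bounds: drop/take is exact)
      (num_parsed + 8, tailing, remainder, pack.set row ((bs.drop num_parsed).take 8))
    else if tailing = 0 then
      let r2 := cpPadTo ((8 - row) * 8 - 1) ((bs.drop num_parsed) ++ [128]) ++ [7]
      (num_parsed + 8, 1, r2, pack.set row (r2.take 8))
    else
      (num_parsed + 8, tailing + 1, remainder,
        pack.set row ((remainder.drop (tailing * 8)).take 8))

-- one iteration of A's `for p in range(num_packs)` loop; the `data_packs.append(0)`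
-- placeholder immediately overwritten by `data_packs[p] = pack[:]` is ported as one append
def cpOuter (bs : List Int) (st : Nat × List (List Int) × List (List (List Int))) (_p : Nat) :
    Nat × List (List Int) × List (List (List Int)) :=
  match st with
  | (num_parsed, pack, dps) =>
    match (List.range 8).foldl (cpInner bs) (num_parsed, 0, ([] : List Int), pack) with
    | (np', _, _, pack') => (np', pack', dps ++ [pack'])

-- math.ceil(len/64) on a non-negative length is (len+63)/64; Python's `pack = [0]*8`
-- holds int placeholders that are all overwritten before any read, ported as 8 empty rows
def create_packets (bytes_in : List Int) : List (List (List Int)) :=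
  ((List.range ((bytes_in.length + 63) / 64)).foldl (cpOuter bytes_in)
    (0, List.replicate 8 ([] : List Int), [])).2.2

-- ===== PORT B =====
-- `-(-n//64)` on a non-negative n is (n+63)/64
def create_packets_alt (bytes_in : List Int) : List (List (List Int)) :=
  let n := bytes_in.length
  let num_packs := (n + 63) / 64
  let size := num_packs * 64
  let flat0 := if n % 64 ≠ 0 then bytes_in ++ [128] else bytes_in
  let flat1 := flat0 ++ List.replicate (size - 1 - flat0.length) 0
  let flat := if flat1.length < size then flat1 ++ [7] else flat1
  (List.range num_packs).map (fun p =>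
    (List.range 8).map (fun r => (flat.drop (p * 64 + r * 8)).take 8))

-- ===== PRECONDITION & SPEC =====
def Spec_create_packets (bytes_in : List Int) (out : List (List (List Int))) : Prop := out = create_packets_alt bytes_in
instance (bytes_in : List Int) (out : List (List (List Int))) : Decidable (Spec_create_packets bytes_in out) := by unfold Spec_create_packets; infer_instance

-- ===== CLAIM (what is proved, stated in full; the proofs are below) =====
def Claim_equal_create_packets : Prop := ∀ (bytes_in : List Int), Dom_create_packets bytes_in → Spec_create_packets bytes_in (create_packets bytes_in)

-- ===== LEMMAS AND PROOFS =====

-- B's padded flat buffer, as a proof-side definition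
def pvFlat (bs : List Int) : List Int :=
  let n := bs.length
  let size := ((n + 63) / 64) * 64
  let flat0 := if n % 64 ≠ 0 then bs ++ [128] else bs
  let flat1 := flat0 ++ List.replicate (size - 1 - flat0.length) 0
  if flat1.length < size then flat1 ++ [7] else flat1

-- the r-th row of packet p, read off the flat buffer
def pvRow (bs : List Int) (p r : Nat) : List Int :=
  ((pvFlat bs).drop (p * 64 + r * 8)).take 8

lemma alt_eq (bs : List Int) :
    create_packets_alt bs
      = (List.range ((bs.length + 63) / 64)).map (fun p =>
          (List.range 8).map (fun r => pvRow bs p r)) := rfl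

lemma cpPadTo_eq (t : Nat) (r : List Int) :
    cpPadTo t r = r ++ List.replicate (t - r.length) 0 := by
  rw [cpPadTo]
  split
  · rename_i h
    rw [cpPadTo_eq t (r ++ [0])]
    simp [List.length_append, List.append_assoc]
    have : t - r.length = (t - (r.length + 1)) + 1 := by omega
    rw [this, List.replicate_succ]
  · rename_i h
    have : t - r.length = 0 := by omega
    simp [this]
termination_by t - r.length
decreasing_by simp [List.length_append]; omega

lemma pvFlat_len (bs : List Int) :
    (pvFlat bs).length = ((bs.length + 63) / 64) * 64 := by
  unfold pvFlat
  simp only []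
  split_ifs <;> simp_all <;> omega

lemma pvFlat_split (bs : List Int) : ∃ t, pvFlat bs = bs ++ t := by
  unfold pvFlat
  simp only []
  split_ifs <;> simp [List.append_assoc]

lemma pvRow_inbounds (bs : List Int) (p r : Nat) (h : p * 64 + r * 8 + 8 ≤ bs.length) :
    pvRow bs p r = (bs.drop (p * 64 + r * 8)).take 8 := by
  obtain ⟨t, ht⟩ := pvFlat_split bs
  unfold pvRow
  rw [ht, List.drop_append, List.take_append]
  have h2 : (bs.drop (p * 64 + r * 8)).length = bs.length - (p * 64 + r * 8) := by simp
  have h3 : 8 - (bs.drop (p * 64 + r * 8)).length = 0 := by omega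
  have h4 : p * 64 + r * 8 - bs.length = 0 := by omega
  simp [h4]
  left; omega

lemma crux (bs : List Int) (p r : Nat) (hr : r < 8)
    (h1 : p * 64 + r * 8 ≤ bs.length) (h2 : bs.length < p * 64 + r * 8 + 8)
    (h3 : p * 64 < bs.length) :
    cpPadTo ((8 - r) * 8 - 1) (bs.drop (p * 64 + r * 8) ++ [128]) ++ [7]
      = (pvFlat bs).drop (p * 64 + r * 8)
        ++ (if bs.length = p * 64 + 63 then [7] else []) := by
  have hmod : bs.length % 64 ≠ 0 := by omega
  rw [cpPadTo_eq]
  unfold pvFlat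
  simp only [List.length_append, List.length_cons, List.length_nil, List.length_replicate,
    if_pos hmod]
  have hS : ((bs.length + 63) / 64) * 64 = (p + 1) * 64 := by omega
  rw [hS]
  have hdk : (bs.drop (p * 64 + r * 8)).length = bs.length - (p * 64 + r * 8) := by simp
  split_ifs with hB hC hC
  · -- flat1 shorter than size: the trailing 7 is kept; bs.length ≠ p*64+63
    exfalso; omega
  · rw [List.drop_append, List.drop_append, List.drop_append]
    have e1 : p * 64 + r * 8 - bs.length = 0 := by omega
    have e2 : p * 64 + r * 8 - (bs.length + 1) = 0 := by omega
    have e3 : p * 64 + r * 8 - (bs.length + 1 + ((p+1)*64 - 1 - (bs.length + 1))) = 0 := by omega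
    have e4 : (8 - r) * 8 - 1 - (bs.length - (p * 64 + r * 8) + 1)
        = (p+1)*64 - 1 - (bs.length + 1) := by omega
    have e5 : p * 64 + r * 8 - (bs.length + ((p+1)*64 - 1 - (bs.length + 1) + 1)) = 0 := by omega
    simp [e1, e2, e4, e5, List.append_assoc]
  · -- flat1 already full (bs.length % 64 = 63): the 7 would overflow and is dropped
    rw [List.drop_append, List.drop_append]
    have hm : bs.length = p * 64 + 63 := by omega
    have hr7 : r = 7 := by omega
    have e1 : p * 64 + r * 8 - bs.length = 0 := by omega
    have e2 : p * 64 + r * 8 - (bs.length + 1) = 0 := by omega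
    have e3 : (p+1)*64 - 1 - (bs.length + 1) = 0 := by omega
    have e4 : (8 - r) * 8 - 1 - (p * 64 + 63 - (p * 64 + r * 8) + 1) = 0 := by omega
    have e5 : p * 64 + r * 8 - (p * 64 + 63) = 0 := by omega
    have e6 : (p+1)*64 - 1 - (p * 64 + 63 + 1) - (p * 64 + r * 8 - (p * 64 + 63 + 1)) = 0 := by
      omega
    simp [e4, e5, e6, hm, List.append_assoc]
  · exfalso; omega

lemma sets8 (g : Nat → List Int) (pk : List (List Int)) (h : pk.length = 8) :
    (List.range' 0 8).foldl (fun q i => q.set i (g i)) pk = (List.range 8).map g := by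
  rcases pk with _ | ⟨a, _ | ⟨b, _ | ⟨c, _ | ⟨d, _ | ⟨e, _ | ⟨f, _ | ⟨x, _ | ⟨y, _ | ⟨z, pk⟩⟩⟩⟩⟩⟩⟩⟩⟩ <;>
    simp at h
  rfl

def pvRem (bs : List Int) (p : Nat) : List Int :=
  (pvFlat bs).drop (p * 64 + ((bs.length - p * 64) / 8) * 8)
    ++ (if bs.length = p * 64 + 63 then [7] else [])

lemma take8_flat (bs : List Int) (p r : Nat) (hp : p + 1 ≤ (bs.length + 63) / 64)
    (hr : r < 8) (extra : List Int) :
    ((pvFlat bs).drop (p * 64 + r * 8) ++ extra).take 8 = pvRow bs p r := by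
  rw [List.take_append]
  have h8 : (8:Nat) - ((pvFlat bs).drop (p * 64 + r * 8)).length = 0 := by
    simp [pvFlat_len]; omega
  rw [h8, List.take_zero, List.append_nil]
  rfl

lemma inner_go (bs : List Int) (p : Nat) (hp : p + 1 ≤ (bs.length + 63) / 64) :
    ∀ (c r : Nat), r + c = 8 →
    ∀ (tl : Nat) (rem : List Int) (pk : List (List Int)),
    ((p * 64 + r * 8 ≤ bs.length ∧ tl = 0) ∨
     (bs.length < p * 64 + r * 8 ∧ tl + (bs.length - p * 64) / 8 = r ∧ 0 < tl ∧
      rem = pvRem bs p)) →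
    ∃ tl' rem',
      (List.range' r c).foldl (cpInner bs) (p * 64 + r * 8, tl, rem, pk)
        = (p * 64 + r * 8 + c * 8, tl', rem',
           (List.range' r c).foldl (fun q i => q.set i (pvRow bs p i)) pk) := by
  intro c
  induction c with
  | zero => intro r h tl rem pk _; exact ⟨tl, rem, by simp⟩
  | succ c ih =>
    intro r h tl rem pk hst
    have hn : p * 64 < bs.length := by omega
    have hr : r < 8 := by omega
    rw [List.range'_succ]
    by_cases hfull : p * 64 + r * 8 + 8 ≤ bs.length
    · -- a full row: slice straight out of bytes_in
      have htl : tl = 0 := by rcases hst with ⟨_, h0⟩ | ⟨h0, _, _, _⟩ <;> omega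
      have hstep : cpInner bs (p * 64 + r * 8, tl, rem, pk) r
          = (p * 64 + r * 8 + 8, tl, rem, pk.set r (pvRow bs p r)) := by
        rw [pvRow_inbounds bs p r hfull]
        simp [cpInner, if_pos hfull]
      rw [List.foldl_cons, hstep]
      have h1 : p * 64 + r * 8 + 8 = p * 64 + (r + 1) * 8 := by ring
      rw [h1]
      obtain ⟨tl', rem', hres⟩ := ih (r + 1) (by omega) tl rem (pk.set r (pvRow bs p r))
        (Or.inl ⟨by omega, htl⟩)
      refine ⟨tl', rem', ?_⟩
      rw [hres, List.foldl_cons]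
      have harith : p * 64 + (r + 1) * 8 + c * 8 = p * 64 + r * 8 + (c + 1) * 8 := by ring
      rw [harith]
    · by_cases htl0 : tl = 0
      · -- first short row: A builds the remainder = tail of B's flat buffer
        have hle : p * 64 + r * 8 ≤ bs.length := by
          rcases hst with ⟨h0, _⟩ | ⟨h0, _, h2, _⟩ <;> omega
        have hdiv : (bs.length - p * 64) / 8 = r := by omega
        have hcrux := crux bs p r hr hle (by omega) hn
        have hrem : cpPadTo ((8 - r) * 8 - 1) (bs.drop (p * 64 + r * 8) ++ [128]) ++ [7]
            = pvRem bs p := by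
          rw [hcrux, pvRem, hdiv]
        have htake : (pvRem bs p).take 8 = pvRow bs p r := by
          rw [pvRem, hdiv]; exact take8_flat bs p r hp hr _
        have hstep : cpInner bs (p * 64 + r * 8, tl, rem, pk) r
            = (p * 64 + r * 8 + 8, 1, pvRem bs p, pk.set r (pvRow bs p r)) := by
          simp only [cpInner, if_neg hfull, if_pos htl0, hrem, htake]
        rw [List.foldl_cons, hstep]
        have h1 : p * 64 + r * 8 + 8 = p * 64 + (r + 1) * 8 := by ring
        rw [h1]
        obtain ⟨tl', rem', hres⟩ := ih (r + 1) (by omega) 1 (pvRem bs p)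
          (pk.set r (pvRow bs p r)) (Or.inr ⟨by omega, by omega, by omega, rfl⟩)
        refine ⟨tl', rem', ?_⟩
        rw [hres, List.foldl_cons]
        have harith : p * 64 + (r + 1) * 8 + c * 8 = p * 64 + r * 8 + (c + 1) * 8 := by ring
        rw [harith]
      · -- continuing tail rows: slices of the remainder are slices of the flat buffer
        rcases hst with ⟨_, h0⟩ | ⟨hlt, hsum, hpos, hremv⟩
        · exact absurd h0 htl0
        have hS : ((pvFlat bs).drop (p * 64 + ((bs.length - p * 64) / 8) * 8)).length
            = ((bs.length + 63) / 64) * 64 - (p * 64 + ((bs.length - p * 64) / 8) * 8) := by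
          simp [pvFlat_len]
        have htake : (rem.drop (tl * 8)).take 8 = pvRow bs p r := by
          rw [hremv, pvRem, List.drop_append]
          have hz : tl * 8 - ((pvFlat bs).drop (p * 64 + ((bs.length - p * 64) / 8) * 8)).length
              = 0 := by rw [hS]; omega
          rw [hz, List.drop_drop, List.drop_zero]
          have hidx : p * 64 + (bs.length - p * 64) / 8 * 8 + tl * 8 = p * 64 + r * 8 := by
            omega
          rw [hidx]
          exact take8_flat bs p r hp hr _
        have hstep : cpInner bs (p * 64 + r * 8, tl, rem, pk) r
            = (p * 64 + r * 8 + 8, tl + 1, rem, pk.set r (pvRow bs p r)) := by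
          simp only [cpInner, if_neg hfull, if_neg htl0, htake]
        rw [List.foldl_cons, hstep]
        have h1 : p * 64 + r * 8 + 8 = p * 64 + (r + 1) * 8 := by ring
        rw [h1]
        obtain ⟨tl', rem', hres⟩ := ih (r + 1) (by omega) (tl + 1) rem
          (pk.set r (pvRow bs p r)) (Or.inr ⟨by omega, by omega, by omega, hremv⟩)
        refine ⟨tl', rem', ?_⟩
        rw [hres, List.foldl_cons]
        have harith : p * 64 + (r + 1) * 8 + c * 8 = p * 64 + r * 8 + (c + 1) * 8 := by ring
        rw [harith]

lemma outer_go (bs : List Int) : ∀ (c p : Nat), p + c = (bs.length + 63) / 64 →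
    ∀ (pk : List (List Int)), pk.length = 8 → ∀ (dps : List (List (List Int))),
    ∃ pk', pk'.length = 8 ∧
      (List.range' p c).foldl (cpOuter bs) (p * 64, pk, dps)
        = (p * 64 + c * 64, pk',
           dps ++ (List.range' p c).map (fun q => (List.range 8).map (pvRow bs q))) := by
  intro c
  induction c with
  | zero => intro p h pk hpk dps; exact ⟨pk, hpk, by simp⟩
  | succ c ih =>
    intro p h pk hpk dps
    rw [List.range'_succ, List.foldl_cons]
    have hp : p + 1 ≤ (bs.length + 63) / 64 := by omega
    obtain ⟨tl', rem', hres⟩ := inner_go bs p hp 8 0 (by omega) 0 [] pk (Or.inl ⟨by omega, rfl⟩)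
    have hstep : cpOuter bs (p * 64, pk, dps) p
        = (p * 64 + 64, (List.range 8).map (pvRow bs p),
           dps ++ [(List.range 8).map (pvRow bs p)]) := by
      have h0 : (p * 64 + 0 * 8 : Nat) = p * 64 := by ring
      rw [h0] at hres
      simp only [cpOuter, List.range_eq_range', hres, sets8 (pvRow bs p) pk hpk]
    rw [hstep]
    have h64 : (p * 64 + 64 : Nat) = (p + 1) * 64 := by ring
    rw [h64]
    obtain ⟨pk', hlen', hres'⟩ := ih (p + 1) (by omega)
      ((List.range 8).map (pvRow bs p)) (by simp)
      (dps ++ [(List.range 8).map (pvRow bs p)])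
    refine ⟨pk', hlen', ?_⟩
    rw [hres']
    have harith : (p + 1) * 64 + c * 64 = p * 64 + (c + 1) * 64 := by ring
    rw [harith, List.map_cons, List.append_assoc]
    rfl

-- ===== VERDICT =====
theorem create_packets_spec : Claim_equal_create_packets := by
  intro bs _
  unfold Spec_create_packets create_packets
  obtain ⟨pk', hlen, hres⟩ := outer_go bs ((bs.length + 63) / 64) 0 (by omega)
    (List.replicate 8 []) (by simp) []
  have h0 : (0 : Nat) * 64 = 0 := by ring
  rw [h0] at hres
  rw [List.range_eq_range', hres, alt_eq, List.range_eq_range']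
  simp [List.range_eq_range']
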